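-- pv_equiv track=rewrite | github.com/jooyun-1/PS_repo | 프로그래머스/5/49190. 방의 개수/방의 개수.py | solution
-- ===== SOURCE A (Python) =====
-- def solution(arrows):
--     #    위 북동 오른 남동 아래 남서 왼 북서
--     dx = [0, 1, 1, 1, 0, -1, -1, -1]
--     dy = [-1, -1, 0, 1, 1, 1, 0, -1]
--
--     x, y = 0, 0
--     # 중복을 없애기 위해 set으로 설정
--     visited_node = set()
--     visited_node.add((x,y))
--     route = set()
--     cycle = 0
--     for arrow in arrows:
--         # 모래시계 교차점을 정점으로 만들기 위해 두칸 이동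
--         for _ in range(2):
--             nx, ny = x+dx[arrow], y + dy[arrow]
--             if (nx,ny) in visited_node and (x, y, nx, ny) not in route:
--                 cycle += 1
--             # 엣지 추가 (왔다갔다 경로를 이용)
--             route.add((x,y, nx, ny))
--             route.add((nx, ny, x,y))
--             # 노드 추가
--             visited_node.add((nx, ny))
--             x, y = nx, ny
--     return cycle
-- ===== SOURCE B (Python) =====
-- def solution(arrows):
--     dx = [0, 1, 1, 1, 0, -1, -1, -1]
--     dy = [-1, -1, 0, 1, 1, 1, 0, -1]
--     x, y = 0, 0
--     nodes = {(0, 0)}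
--     edges = set()
--     for arrow in arrows:
--         for _ in range(2):
--             nx, ny = x + dx[arrow], y + dy[arrow]
--             e = ((x, y), (nx, ny)) if (x, y) <= (nx, ny) else ((nx, ny), (x, y))
--             edges.add(e)
--             nodes.add((nx, ny))
--             x, y = nx, ny
--     # Euler's formula for a connected plane walk: cycles = E - V + 1
--     return len(edges) - len(nodes) + 1
-- ===== Notes on version B (the rewrite author's own statement) =====
-- stated objective: simpler
-- what changed: B drops A's on-the-fly cycle-detection conditional: it just collects the distinct visited nodes and canonically-ordered undirected edges during the walk and returns len(E) - len(V) + 1 (Euler's formula for the connected walk).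
import Mathlib
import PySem

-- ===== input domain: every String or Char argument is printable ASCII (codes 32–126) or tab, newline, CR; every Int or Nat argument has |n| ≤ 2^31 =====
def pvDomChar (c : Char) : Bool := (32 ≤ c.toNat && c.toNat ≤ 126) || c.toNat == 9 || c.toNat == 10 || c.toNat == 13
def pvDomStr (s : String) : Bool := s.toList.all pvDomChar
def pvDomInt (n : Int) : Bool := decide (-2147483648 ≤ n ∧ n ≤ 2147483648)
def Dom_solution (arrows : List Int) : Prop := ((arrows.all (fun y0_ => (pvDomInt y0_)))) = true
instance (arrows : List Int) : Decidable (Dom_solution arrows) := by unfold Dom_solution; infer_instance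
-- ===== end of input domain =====

-- B replaces A's incremental cycle-count conditional by Euler's formula |E| - |V| + 1 over the fully built node/edge sets (objective: simpler).

-- ===== PORT A =====
def pvDx : List Int := [0, 1, 1, 1, 0, -1, -1, -1]
def pvDy : List Int := [-1, -1, 0, 1, 1, 1, 0, -1]

abbrev StA := Int × Int × PySem.Set (Int × Int) × PySem.Set (Int × Int × Int × Int) × Int

def stepA (dxv dyv : Int) (st : StA) : StA :=
  let (x, y, visited, route, cycle) := st
  let nx := x + dxv
  let ny := y + dyv
  let cycle' := if (nx, ny) ∈ visited ∧ (x, y, nx, ny) ∉ route then cycle + 1 else cycle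
  let route' := PySem.Set.add (PySem.Set.add route (x, y, nx, ny)) (nx, ny, x, y)
  let visited' := PySem.Set.add visited (nx, ny)
  (nx, ny, visited', route', cycle')

-- dx[arrow] raises IndexError outside [-8,8); the Option mirrors that (none = raise)
def stepsA (st : StA) (arrow : Int) : Option StA :=
  match PySem.List.pyGet? pvDx arrow, PySem.List.pyGet? pvDy arrow with
  | some dxv, some dyv => some (stepA dxv dyv (stepA dxv dyv st))
  | _, _ => none

def solution (arrows : List Int) : Int :=
  match arrows.foldl (fun st? arrow => st?.bind (fun st => stepsA st arrow)) (some (0, 0, PySem.Set.add PySem.Set.empty (0, 0), PySem.Set.empty, 0)) with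
  | some (_, _, _, _, cycle) => cycle
  | none => 0

-- ===== PORT B =====
-- Python tuple comparison (x,y) <= (nx,ny), then the canonically ordered undirected edge
def canonEdge (p q : Int × Int) : (Int × Int) × (Int × Int) :=
  if p.1 < q.1 ∨ (p.1 = q.1 ∧ p.2 ≤ q.2) then (p, q) else (q, p)

abbrev StB := Int × Int × PySem.Set (Int × Int) × PySem.Set ((Int × Int) × (Int × Int))

def stepB (dxv dyv : Int) (st : StB) : StB :=
  let (x, y, nodes, edges) := st
  let nx := x + dxv
  let ny := y + dyv
  let edges' := PySem.Set.add edges (canonEdge (x, y) (nx, ny))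
  let nodes' := PySem.Set.add nodes (nx, ny)
  (nx, ny, nodes', edges')

def stepsB (st : StB) (arrow : Int) : Option StB :=
  match PySem.List.pyGet? pvDx arrow, PySem.List.pyGet? pvDy arrow with
  | some dxv, some dyv => some (stepB dxv dyv (stepB dxv dyv st))
  | _, _ => none

def solution_alt (arrows : List Int) : Int :=
  match arrows.foldl (fun st? arrow => st?.bind (fun st => stepsB st arrow)) (some (0, 0, PySem.Set.add PySem.Set.empty (0, 0), PySem.Set.empty)) with
  | some (_, _, nodes, edges) => (edges.length : Int) - (nodes.length : Int) + 1
  | none => 0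

-- ===== PRECONDITION & SPEC =====
-- A raises IndexError (dx[arrow]) exactly when some arrow is outside [-8, 8); Pre_ excludes only those raising inputs.
def Pre_solution (arrows : List Int) : Prop := ∀ a ∈ arrows, -8 ≤ a ∧ a < 8
instance (arrows : List Int) : Decidable (Pre_solution arrows) := by unfold Pre_solution; infer_instance
def pvWitness_solution : List Int := [6, 6, 6, 4, 1, 1, 1, 0]

def Spec_solution (arrows : List Int) (out : Int) : Prop := out = solution_alt arrows
instance (arrows : List Int) (out : Int) : Decidable (Spec_solution arrows out) := by unfold Spec_solution; infer_instance

-- ===== CLAIM (what is proved, stated in full; the proofs are below) =====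
def Claim_equal_solution : Prop := ∀ (arrows : List Int), Dom_solution arrows → Pre_solution arrows → Spec_solution arrows (solution arrows)

-- ===== LEMMAS AND PROOFS =====

lemma canonEdge_comm (p q : Int × Int) : canonEdge p q = canonEdge q p := by
  obtain ⟨a, b⟩ := p; obtain ⟨c, d⟩ := q
  unfold canonEdge
  split_ifs with h1 h2 h2 <;> simp_all <;> (constructor <;> [skip; constructor] <;> omega)

lemma canonEdge_cases (p q : Int × Int) : canonEdge p q = (p, q) ∨ canonEdge p q = (q, p) := by
  unfold canonEdge; split_ifs <;> simp

lemma canonEdge_inj {p q r s : Int × Int} (h : canonEdge p q = canonEdge r s) :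
    (p = r ∧ q = s) ∨ (p = s ∧ q = r) := by
  rcases canonEdge_cases p q with h1 | h1 <;> rcases canonEdge_cases r s with h2 | h2 <;>
    rw [h1, h2] at h <;> simp only [Prod.mk.injEq] at h <;> tauto

-- the invariant tying an A-state to a B-state (same position/nodes; route = both orientations of E; cycle = |E| - |V| + 1)
def PInv (x y : Int) (V : PySem.Set (Int × Int)) (R : PySem.Set (Int × Int × Int × Int))
    (c : Int) (E : PySem.Set ((Int × Int) × (Int × Int))) : Prop :=
  (∀ a b u v : Int, (a, b, u, v) ∈ R ↔ canonEdge (a, b) (u, v) ∈ E) ∧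
  (∀ e ∈ E, e.1 ∈ V ∧ e.2 ∈ V) ∧
  (x, y) ∈ V ∧
  c = (E.length : Int) - (V.length : Int) + 1

lemma length_add_of_mem {α : Type} [BEq α] [LawfulBEq α] {s : PySem.Set α} {x : α} (h : x ∈ s) :
    (PySem.Set.add s x).length = s.length := by
  rw [PySem.Set.add_of_mem h]

lemma length_add_of_not_mem {α : Type} [BEq α] [LawfulBEq α] {s : PySem.Set α} {x : α} (h : x ∉ s) :
    (PySem.Set.add s x).length = s.length + 1 := by
  rw [PySem.Set.add_of_not_mem h, List.length_append, List.length_cons, List.length_nil]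

lemma step_inv (dxv dyv x y : Int) (V : PySem.Set (Int × Int)) (R : PySem.Set (Int × Int × Int × Int))
    (c : Int) (E : PySem.Set ((Int × Int) × (Int × Int))) (h : PInv x y V R c E) :
    stepA dxv dyv (x, y, V, R, c) = (x + dxv, y + dyv,
        PySem.Set.add V (x + dxv, y + dyv),
        PySem.Set.add (PySem.Set.add R (x, y, x + dxv, y + dyv)) (x + dxv, y + dyv, x, y),
        if (x + dxv, y + dyv) ∈ V ∧ (x, y, x + dxv, y + dyv) ∉ R then c + 1 else c) ∧
    stepB dxv dyv (x, y, V, E) = (x + dxv, y + dyv,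
        PySem.Set.add V (x + dxv, y + dyv),
        PySem.Set.add E (canonEdge (x, y) (x + dxv, y + dyv))) ∧
    PInv (x + dxv) (y + dyv) (PySem.Set.add V (x + dxv, y + dyv))
        (PySem.Set.add (PySem.Set.add R (x, y, x + dxv, y + dyv)) (x + dxv, y + dyv, x, y))
        (if (x + dxv, y + dyv) ∈ V ∧ (x, y, x + dxv, y + dyv) ∉ R then c + 1 else c)
        (PySem.Set.add E (canonEdge (x, y) (x + dxv, y + dyv))) := by
  obtain ⟨hiff, hend, hxy, hc⟩ := h
  refine ⟨rfl, rfl, ?_, ?_, ?_, ?_⟩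
  · -- route membership ↔ canonical edge membership
    intro a b u v
    rw [PySem.Set.mem_add, PySem.Set.mem_add, PySem.Set.mem_add, hiff a b u v]
    constructor
    · rintro ((hR | hq) | hq)
      · exact Or.inl hR
      · refine Or.inr ?_
        simp only [Prod.mk.injEq] at hq
        obtain ⟨h1, h2, h3, h4⟩ := hq
        subst h1; subst h2; subst h3; subst h4; rfl
      · refine Or.inr ?_
        simp only [Prod.mk.injEq] at hq
        obtain ⟨h1, h2, h3, h4⟩ := hq
        subst h1; subst h2; subst h3; subst h4
        exact canonEdge_comm _ _
    · rintro (hR | hq)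
      · exact Or.inl (Or.inl hR)
      · rcases canonEdge_inj hq with ⟨h1, h2⟩ | ⟨h1, h2⟩
      
        · simp only [Prod.mk.injEq] at h1 h2
          exact Or.inl (Or.inr (by simp [h1.1, h1.2, h2.1, h2.2]))
        · simp only [Prod.mk.injEq] at h1 h2
          exact Or.inr (by simp [h1.1, h1.2, h2.1, h2.2])
  · -- endpoints of every edge are recorded nodes
    intro e he
    rw [PySem.Set.mem_add] at he
    rcases he with he | he
    · obtain ⟨h1, h2⟩ := hend e he
      exact ⟨(PySem.Set.mem_add _ _ _).mpr (Or.inl h1), (PySem.Set.mem_add _ _ _).mpr (Or.inl h2)⟩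
    · subst he
      rcases canonEdge_cases (x, y) (x + dxv, y + dyv) with h | h <;> rw [h]
      · exact ⟨(PySem.Set.mem_add _ _ _).mpr (Or.inl hxy), (PySem.Set.mem_add _ _ _).mpr (Or.inr rfl)⟩
      · exact ⟨(PySem.Set.mem_add _ _ _).mpr (Or.inr rfl), (PySem.Set.mem_add _ _ _).mpr (Or.inl hxy)⟩
  · exact (PySem.Set.mem_add _ _ _).mpr (Or.inr rfl)
  · -- the count
    by_cases he : canonEdge (x, y) (x + dxv, y + dyv) ∈ E
    · have hR : (x, y, x + dxv, y + dyv) ∈ R := (hiff _ _ _ _).mpr he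
      have hv : (x + dxv, y + dyv) ∈ V := by
        obtain ⟨h1, h2⟩ := hend _ he
        rcases canonEdge_cases (x, y) (x + dxv, y + dyv) with h | h <;> rw [h] at h1 h2
        · exact h2
        · exact h1
      rw [if_neg (by tauto), length_add_of_mem he, length_add_of_mem hv]
      exact hc
    · have hR : (x, y, x + dxv, y + dyv) ∉ R := fun hx => he ((hiff _ _ _ _).mp hx)
      rw [length_add_of_not_mem he]
      by_cases hv : (x + dxv, y + dyv) ∈ V
      · rw [if_pos ⟨hv, hR⟩, length_add_of_mem hv]
        push_cast; omega
      · rw [if_neg (by tauto), length_add_of_not_mem hv]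
        push_cast; omega

-- PInvO lifts PInv to the Option-valued loop states
def PInvO : Option StA → Option StB → Prop
  | some (x, y, V, R, c), some (x', y', V', E) => x = x' ∧ y = y' ∧ V = V' ∧ PInv x y V R c E
  | none, none => True
  | _, _ => False

lemma stepsO (arrow : Int) (sa : Option StA) (sb : Option StB) (h : PInvO sa sb) :
    PInvO (sa.bind (fun st => stepsA st arrow)) (sb.bind (fun st => stepsB st arrow)) := by
  match sa, sb with
  | none, none => exact trivial
  | none, some _ => exact h.elim
  | some _, none => exact h.elim
  | some (x, y, V, R, c), some (x', y', V', E) =>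
    obtain ⟨hx, hy, hV, hinv⟩ := h
    subst hx; subst hy; subst hV
    cases hdx : PySem.List.pyGet? pvDx arrow with
    | none => simp [stepsA, stepsB, hdx, PInvO]
    | some dxv =>
      cases hdy : PySem.List.pyGet? pvDy arrow with
      | none => simp [stepsA, stepsB, hdx, hdy, PInvO]
      | some dyv =>
        simp only [Option.bind_some, stepsA, stepsB, hdx, hdy]
        obtain ⟨ea1, eb1, hinv1⟩ := step_inv dxv dyv x y V R c E hinv
        rw [ea1, eb1]
        obtain ⟨ea2, eb2, hinv2⟩ := step_inv dxv dyv _ _ _ _ _ _ hinv1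
        rw [ea2, eb2]
        exact ⟨rfl, rfl, rfl, hinv2⟩

lemma fold_inv (arrows : List Int) (sa : Option StA) (sb : Option StB) (h : PInvO sa sb) :
    PInvO (arrows.foldl (fun st? arrow => st?.bind (fun st => stepsA st arrow)) sa)
         (arrows.foldl (fun st? arrow => st?.bind (fun st => stepsB st arrow)) sb) := by
  induction arrows generalizing sa sb with
  | nil => exact h
  | cons a as ih =>
    simp only [List.foldl_cons]
    exact ih _ _ (stepsO a sa sb h)

-- ===== VERDICT (by name: the statement is the Claim_ definition above) =====
theorem solution_spec : Claim_equal_solution := by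
  intro arrows _ _
  unfold Spec_solution solution solution_alt
  have h0 : PInvO (some (0, 0, PySem.Set.add PySem.Set.empty (0, 0), PySem.Set.empty, 0))
      (some (0, 0, PySem.Set.add PySem.Set.empty (0, 0), PySem.Set.empty)) := by
    refine ⟨rfl, rfl, rfl, ?_, ?_, ?_, ?_⟩
    · intro a b u v; simp [PySem.Set.empty]
    · intro e he; simp [PySem.Set.empty] at he
    · exact (PySem.Set.mem_add _ _ _).mpr (Or.inr rfl)
    · decide
  have h := fold_inv arrows _ _ h0
  revert h
  cases arrows.foldl (fun st? arrow => st?.bind (fun st => stepsA st arrow))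
      (some (0, 0, PySem.Set.add PySem.Set.empty (0, 0), PySem.Set.empty, 0)) with
  | none =>
    cases arrows.foldl (fun st? arrow => st?.bind (fun st => stepsB st arrow))
        (some (0, 0, PySem.Set.add PySem.Set.empty (0, 0), PySem.Set.empty)) with
    | none => intro _; rfl
    | some sb => intro h; exact h.elim
  | some sa =>
    obtain ⟨x, y, V, R, c⟩ := sa
    cases arrows.foldl (fun st? arrow => st?.bind (fun st => stepsB st arrow))
        (some (0, 0, PySem.Set.add PySem.Set.empty (0, 0), PySem.Set.empty)) with
    | none => intro h; exact h.elim
    | some sb =>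
      obtain ⟨x', y', V', E⟩ := sb
      rintro ⟨-, -, rfl, -, -, -, hc⟩
      exact hc
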